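-- pv_equiv track=rewrite | github.com/pommevilla/bcb.567 | multisequence_alignment/bcb567_project3_utils.py | create_word_code_array
-- ===== SOURCE A (Python) =====
-- def process_dna_string(dnastring, wordmodel):
--     """
--     dnastring - some dna string
--     wordmodel - a string of 1s and 0s indicating checked and unchecked positions
--
--     returns a new dnastring made by removing char[j] for each j such that
--         wordmodel[j] == 0
--
--     >>> process_dna_string('ACTT', '1101')
--     'ACT'
--
--     >>> process_dna_string('GGATGAT', '1101100')
--     'GGTG'
--
--     >>> process_dna_string('CGTATGCAA', '010101011')
--     'GAGAA'
--
--     >>> process_dna_string('TGCACGATCGATGCA', '111111110010110')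
--     'TGCACGATAGC'
--     """
--
--     return ''.join([dnastring[i] for i in range(len(dnastring)) if int(wordmodel[i]) == 1])
--
-- def calc_word_code(dnastring):
--     """
--     dnastring - some dna string
--
--     returns a number representing the decimal value of the dnastring
--
--     >>> calc_word_code('ACTA')
--     28
--
--     >>> calc_word_code('ACTNGTA')
--     -1
--
--     >>> calc_word_code('TCGAGC')
--     3465
--
--     >>> calc_word_code('ACATTN')
--     -1
--
--     >>> calc_word_code('AN')
--     -1
--
--     >>> calc_word_code('TT')
--     15
--
--     >>> calc_word_code('CA')
--     4
--
--     >>> calc_word_code('TC')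
--     13
--     """
--     value_map = {
--                     'A': 0,
--                     'C': 1,
--                     'G': 2,
--                     'T': 3
--                 }
--
--     values = []
--     for char in dnastring:
--         if char not in value_map:
--             return -1
--         else:
--             values.append(value_map[char])
--
--     word_code = 0
--     for n, value in enumerate(values):
--         word_code += value * (4 ** (len(values) - n - 1))
--
--     return word_code
--
-- def create_word_code_array(dnastring, wordmodel):
--     '''
--     >>> create_word_code_array('CATCGTGANATCGTGTN', '11')
--     [4, 3, 13, 6, 11, 14, 8, -1, -1, 3, 13, 6, 11, 14, 11, -1, -1]
--
--     >>> create_word_code_array('TCGCATCNT', '101')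
--     [14, 5, 8, 7, 1, -1, 7, -1, -1]
--
--     >>> create_word_code_array('ACNTNTCAT', '0101')
--     [7, -1, 15, -1, 12, 7, -1, -1, -1]
--     '''
--
--     wlength = len(wordmodel)
--     word_code_array = []
--
--     for i in range(len(dnastring) - wlength + 1):
--         raw_chunk = dnastring[i: i + wlength]
--         processed_chunk = process_dna_string(raw_chunk, wordmodel)
--         code = calc_word_code(processed_chunk)
--         word_code_array.append(code)
--
--     for i in range(wlength - 1):
--         word_code_array.append(-1)
--
--     return word_code_array
-- ===== SOURCE B (Python) =====
-- _VMAP = {'A': 0, 'C': 1, 'G': 2, 'T': 3}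
--
-- def create_word_code_array(dnastring, wordmodel):
--     wlength = len(wordmodel)
--     vals = [_VMAP.get(c, -1) for c in dnastring]
--     offsets = [j for j, c in enumerate(wordmodel) if c == '1']
--     k = len(offsets)
--     coeffs = [4 ** (k - 1 - t) for t in range(k)]
--     pairs = list(zip(coeffs, offsets))
--     out = []
--     for i in range(len(dnastring) - wlength + 1):
--         code = 0
--         for coeff, off in pairs:
--             v = vals[i + off]
--             if v < 0:
--                 code = -1
--                 break
--             code += coeff * v
--         out.append(code)
--     out.extend([-1] * (wlength - 1))
--     return out
-- ===== Notes on version B (the rewrite author's own statement) =====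
-- stated objective: faster
-- what changed: Instead of slicing each window, filtering it through the word model and re-scanning it twice per window, B precomputes once a base-4 value table for the whole string plus the selected offsets with their fixed base-4 coefficients, then does one fused accumulation pass per window (with early -1 on a masked-in non-ACGT base).
import Mathlib
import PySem

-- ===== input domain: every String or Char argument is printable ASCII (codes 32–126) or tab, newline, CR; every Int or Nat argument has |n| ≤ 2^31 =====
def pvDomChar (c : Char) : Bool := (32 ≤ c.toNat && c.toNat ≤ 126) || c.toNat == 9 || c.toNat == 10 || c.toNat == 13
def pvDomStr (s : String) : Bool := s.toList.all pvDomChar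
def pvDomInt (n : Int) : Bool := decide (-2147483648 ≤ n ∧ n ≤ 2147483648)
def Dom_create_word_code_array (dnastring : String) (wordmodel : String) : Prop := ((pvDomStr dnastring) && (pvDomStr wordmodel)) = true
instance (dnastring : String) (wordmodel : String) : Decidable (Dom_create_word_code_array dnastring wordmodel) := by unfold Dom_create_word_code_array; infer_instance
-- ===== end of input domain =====

-- B replaces A's per-window slice/filter/rescan helpers by one whole-string value table plus
-- precomputed selected offsets and base-4 coefficients, fused into a single accumulation per window.

-- ===== PORT A =====
-- value_map of calc_word_code
def pvValueMapA : PySem.Dict Char Int :=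
  PySem.Dict.ofList [('A', 0), ('C', 1), ('G', 2), ('T', 3)]

-- ''.join([dnastring[i] for i in range(len(dnastring)) if int(wordmodel[i]) == 1])
-- (strings as char lists; int(wordmodel[i]) raises ValueError on a non-digit — Pre_ excludes
-- reaching that, so the `none` branch here is never taken on admitted inputs)
def process_dna_string (dnastring : List Char) (wordmodel : List Char) : List Char :=
  (List.range dnastring.length).foldl (fun acc i =>
    match PySem.Int.ofChars? [wordmodel.getD i ' '] with
    | some v => if v = 1 then acc ++ [dnastring.getD i ' '] else acc
    | none => acc) []

-- the first loop of calc_word_code: build `values`, early `return -1` = none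
def pvValuesLoop : List Char → Option (List Int)
  | [] => some []
  | c :: rest =>
    match pvValueMapA.get? c with
    | none => none
    | some v => (pvValuesLoop rest).map (fun vs => v :: vs)

def calc_word_code (dnastring : List Char) : Int :=
  match pvValuesLoop dnastring with
  | none => -1
  | some values =>
    values.zipIdx.foldl (fun wc p => wc + p.1 * (4 : Int) ^ (values.length - p.2 - 1)) 0

def create_word_code_array (dnastring : String) (wordmodel : String) : List Int :=
  let d := dnastring.toList
  let wm := wordmodel.toList
  let wlength := wm.length
  let arr := (PySem.List.pyRange 0 ((d.length : Int) - (wlength : Int) + 1) 1).foldl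
    (fun acc i =>
      acc ++ [calc_word_code (process_dna_string
        (PySem.List.slice d (some i) (some (i + (wlength : Int)))) wm)]) []
  (List.range (wlength - 1)).foldl (fun acc _ => acc ++ [(-1 : Int)]) arr

-- ===== PORT B =====
def pvVmapB : PySem.Dict Char Int :=
  PySem.Dict.ofList [('A', 0), ('C', 1), ('G', 2), ('T', 3)]

-- offsets = [j for j, c in enumerate(wordmodel) if c == '1']
def pvOffsets (wm : List Char) : List Nat :=
  wm.zipIdx.filterMap (fun p => if p.1 = '1' then some p.2 else none)

-- coeffs = [4 ** (k - 1 - t) for t in range(k)]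
def pvCoeffs (k : Nat) : List Int :=
  (List.range k).map (fun t => (4 : Int) ^ (k - 1 - t))

-- the inner `for coeff, off in pairs` loop with its break
def pvWinCode (vals : List Int) (i : Int) : List (Int × Nat) → Int → Int
  | [], code => code
  | (coeff, off) :: rest, code =>
    let v := vals.getD (i.toNat + off) 0
    if v < 0 then -1 else pvWinCode vals i rest (code + coeff * v)

def create_word_code_array_alt (dnastring : String) (wordmodel : String) : List Int :=
  let d := dnastring.toList
  let wm := wordmodel.toList
  let wlength := wm.length
  let vals : List Int := d.map (fun c => pvVmapB.getD c (-1))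
  let offsets := pvOffsets wm
  let pairs := (pvCoeffs offsets.length).zip offsets
  let out := (PySem.List.pyRange 0 ((d.length : Int) - (wlength : Int) + 1) 1).map
    (fun i => pvWinCode vals i pairs 0)
  out ++ List.replicate (wlength - 1) (-1)

-- ===== PRECONDITION & SPEC =====
-- Pre_ excludes exactly the inputs where A raises: a non-digit character in wordmodel while at
-- least one window exists (len(wordmodel) ≤ len(dnastring)) makes int(wordmodel[j]) raise ValueError.
def Pre_create_word_code_array (dnastring : String) (wordmodel : String) : Prop :=
  wordmodel.toList.all (fun c => c.isDigit) = true ∨ dnastring.toList.length < wordmodel.toList.length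
instance (dnastring : String) (wordmodel : String) : Decidable (Pre_create_word_code_array dnastring wordmodel) := by
  unfold Pre_create_word_code_array; infer_instance

def pvWitness_create_word_code_array : String × String := ("CATCGTGA", "101")

def Spec_create_word_code_array (dnastring : String) (wordmodel : String) (out : List Int) : Prop := out = create_word_code_array_alt dnastring wordmodel
instance (dnastring : String) (wordmodel : String) (out : List Int) : Decidable (Spec_create_word_code_array dnastring wordmodel out) := by unfold Spec_create_word_code_array; infer_instance

-- ===== CLAIM (what is proved, stated in full; the proofs are below) =====
def Claim_equal_create_word_code_array : Prop := ∀ (dnastring : String) (wordmodel : String), Dom_create_word_code_array dnastring wordmodel → Pre_create_word_code_array dnastring wordmodel → Spec_create_word_code_array dnastring wordmodel (create_word_code_array dnastring wordmodel)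

-- ===== LEMMAS AND PROOFS =====

-- B's value function, the common currency of the proofs
def pvCv (c : Char) : Int := pvVmapB.getD c (-1)

-- the selected characters of a window, consumed left to right with the base-4 coefficients
def pvCharLoop : List Char → Int → Int
  | [], acc => acc
  | c :: cs, acc => if pvCv c < 0 then -1 else pvCharLoop cs (acc + (4 : Int) ^ cs.length * pvCv c)

def pvWsum : List Int → Int
  | [] => 0
  | v :: vs => v * (4 : Int) ^ vs.length + pvWsum vs

lemma pvValueMapA_get (c : Char) :
    pvValueMapA.get? c = if pvCv c < 0 then none else some (pvCv c) := by
  by_cases hA : c = 'A'; · subst hA; decide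
  by_cases hC : c = 'C'; · subst hC; decide
  by_cases hG : c = 'G'; · subst hG; decide
  by_cases hT : c = 'T'; · subst hT; decide
  simp [pvValueMapA, pvVmapB, pvCv, PySem.Dict.ofList, PySem.Dict.update,
    PySem.Dict.get?_insert, PySem.Dict.getD_insert, hA, hC, hG, hT]

lemma digit_ofChars (c : Char) (h : c.isDigit = true) :
    PySem.Int.ofChars? [c] = some ((c.toNat : Int) - 48) := by
  have h1 : 48 ≤ c.toNat ∧ c.toNat ≤ 57 := by
    simp [Char.isDigit] at h; exact ⟨h.1, h.2⟩
  have hc : c = Char.ofNat c.toNat := by simp [Char.ofNat_toNat]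
  obtain ⟨hl, hr⟩ := h1
  set n := c.toNat with hn
  interval_cases n <;> (rw [hc]; decide)

lemma digit_eq_one (c : Char) :
    ((c.toNat : Int) - 48 = 1) ↔ c = '1' := by
  constructor
  · intro he
    have h49 : c.toNat = 49 := by omega
    have hc : c = Char.ofNat c.toNat := by simp [Char.ofNat_toNat]
    rw [hc, h49]
  · intro he
    rw [he]
    decide

lemma pvOffsets_eq (wm : List Char) :
    pvOffsets wm = (List.range wm.length).filter (fun i => wm.getD i ' ' == '1') := by
  induction wm with
  | nil => rfl
  | cons c w ih =>
    simp only [pvOffsets, List.zipIdx_cons, List.filterMap_cons, List.zipIdx_succ,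
      List.filterMap_map, List.length_cons, List.range_succ_eq_map, List.filter_cons,
      List.filter_map] at *
    have hq : (fun p : Char × Nat => if p.1 = '1' then some p.2 else none) ∘
        (fun x : Char × Nat => (x.1, x.2 + 1)) =
        fun p : Char × Nat => ((if p.1 = '1' then some p.2 else none).map (· + 1)) := by
      funext p; by_cases h : p.1 = '1' <;> simp [h]
    rw [hq, ← List.map_filterMap, ih]
    by_cases h : c = '1' <;> simp [h, Function.comp_def]

lemma pvOffsets_lt (wm : List Char) : ∀ off ∈ pvOffsets wm, off < wm.length := by
  intro off h
  rw [pvOffsets_eq] at h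
  simp only [List.mem_filter, List.mem_range] at h
  exact h.1

lemma process_eq (chunk wm : List Char) (hlen : chunk.length = wm.length)
    (hdig : ∀ c ∈ wm, c.isDigit = true) :
    process_dna_string chunk wm = (pvOffsets wm).map (fun off => chunk.getD off ' ') := by
  unfold process_dna_string
  have step1 : ∀ (acc : List Char) (i : Nat), i ∈ List.range chunk.length →
      (fun acc i =>
        match PySem.Int.ofChars? [wm.getD i ' '] with
        | some v => if v = 1 then acc ++ [chunk.getD i ' '] else acc
        | none => acc) acc i =
      (fun acc i => if wm.getD i ' ' = '1' then acc ++ [chunk.getD i ' '] else acc) acc i := by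
    intro acc i hi
    have hi' : i < wm.length := by rw [← hlen]; simpa using hi
    have hmem : wm.getD i ' ' ∈ wm := by
      have : wm.getD i ' ' = wm[i] := by simp [List.getD, List.getElem?_eq_getElem hi']
      rw [this]; exact List.getElem_mem hi'
    have hd := hdig _ hmem
    show (match PySem.Int.ofChars? [wm.getD i ' '] with
      | some v => if v = 1 then acc ++ [chunk.getD i ' '] else acc
      | none => acc) = if wm.getD i ' ' = '1' then acc ++ [chunk.getD i ' '] else acc
    rw [digit_ofChars _ hd]
    simp only []
    by_cases h1 : wm.getD i ' ' = '1'
    · rw [if_pos ((digit_eq_one _).mpr h1), if_pos h1]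
    · rw [if_neg (fun he => h1 ((digit_eq_one _).mp he)), if_neg h1]
  refine (PySem.List.foldl_congr_mem _ _ _ _ step1).trans ?_
  rw [PySem.List.foldl_append_ite (p := fun i => wm.getD i ' ' = '1') (f := fun i => chunk.getD i ' ')]
  rw [pvOffsets_eq wm, ← hlen]
  simp only [List.nil_append]
  congr 1

lemma pvCoeffs_succ (k : Nat) : pvCoeffs (k + 1) = (4 : Int) ^ k :: pvCoeffs k := by
  simp only [pvCoeffs, List.range_succ_eq_map, List.map_cons, List.map_map]
  congr 1
  apply List.map_congr_left
  intro t _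
  simp only [Function.comp_apply]
  congr 1
  omega

lemma pvValuesLoop_len : ∀ {cs : List Char} {vs : List Int}, pvValuesLoop cs = some vs →
    vs.length = cs.length := by
  intro cs
  induction cs with
  | nil => intro vs h; simp [pvValuesLoop] at h; subst h; rfl
  | cons c rest ih =>
    intro vs h
    simp only [pvValuesLoop] at h
    rcases hg : pvValueMapA.get? c with _ | v <;> rw [hg] at h
    · simp at h
    · rcases hr : pvValuesLoop rest with _ | vs' <;> rw [hr] at h <;> simp at h
      subst h
      simp [ih hr]

lemma pvWsum_fold (vs : List Int) : ∀ (k : Nat) (acc : Int) (K : Nat), k + vs.length = K →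
    (vs.zipIdx k).foldl (fun wc p => wc + p.1 * (4 : Int) ^ (K - p.2 - 1)) acc = acc + pvWsum vs := by
  induction vs with
  | nil => intro k acc K hK; simp [pvWsum]
  | cons v vs ih =>
    intro k acc K hK
    have hK' : k + vs.length + 1 = K := by simpa using hK
    simp only [List.zipIdx_cons, List.foldl_cons]
    rw [ih (k + 1) _ K (by omega)]
    have he : K - k - 1 = vs.length := by omega
    rw [he]
    simp [pvWsum]
    ring

lemma pvCharLoop_eq (cs : List Char) : ∀ acc : Int,
    pvCharLoop cs acc =
      match pvValuesLoop cs with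
      | none => -1
      | some vs => acc + pvWsum vs := by
  induction cs with
  | nil => intro acc; simp [pvCharLoop, pvValuesLoop, pvWsum]
  | cons c cs ih =>
    intro acc
    simp only [pvCharLoop, pvValuesLoop, pvValueMapA_get c]
    by_cases hb : pvCv c < 0
    · simp [hb]
    · rw [if_neg hb, if_neg hb, ih]
      rcases hr : pvValuesLoop cs with _ | vs
      · simp
      · have hl : vs.length = cs.length := pvValuesLoop_len hr
        simp [pvWsum, hl]
        ring

lemma calc_eq_charLoop (cs : List Char) : calc_word_code cs = pvCharLoop cs 0 := by
  rw [calc_word_code, pvCharLoop_eq]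
  rcases hr : pvValuesLoop cs with _ | vs
  · rfl
  · show vs.zipIdx.foldl (fun wc p => wc + p.1 * (4 : Int) ^ (vs.length - p.2 - 1)) 0 = 0 + pvWsum vs
    exact pvWsum_fold vs 0 0 vs.length (by omega)

lemma winCode_eq (d : List Char) (j : Nat) : ∀ (offs : List Nat) (acc : Int),
    (∀ off ∈ offs, j + off < d.length) →
    pvWinCode (d.map pvCv) (j : Int) ((pvCoeffs offs.length).zip offs) acc =
      pvCharLoop (offs.map (fun off => d.getD (j + off) ' ')) acc := by
  intro offs
  induction offs with
  | nil => intro acc _; simp [pvCoeffs, pvWinCode, pvCharLoop]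
  | cons off offs ih =>
    intro acc hb
    have hoff : j + off < d.length := hb off (by simp)
    simp only [List.length_cons, pvCoeffs_succ, List.zip_cons_cons, pvWinCode, List.map_cons,
      pvCharLoop, List.length_map]
    have hv : (d.map pvCv).getD ((j : Int).toNat + off) 0 = pvCv (d.getD (j + off) ' ') := by
      have hjt : (j : Int).toNat = j := Int.toNat_natCast j
      rw [hjt]
      rw [List.getD_eq_getElem?_getD, List.getD_eq_getElem?_getD, List.getElem?_map]
      rw [List.getElem?_eq_getElem hoff]
      simp
    rw [hv]
    by_cases hneg : pvCv (d.getD (j + off) ' ') < 0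
    · rw [if_pos hneg, if_pos hneg]
    · rw [if_neg hneg, if_neg hneg, ih _ (fun o ho => hb o (by simp [ho]))]

-- ===== VERDICT =====
theorem create_word_code_array_spec : Claim_equal_create_word_code_array := by
  intro dna wm _ hpre
  unfold Spec_create_word_code_array create_word_code_array create_word_code_array_alt
  rw [PySem.List.foldl_append_singleton_eq_map, PySem.List.foldl_append_singleton_eq_map]
  simp only [List.nil_append]
  have hrepl : (List.range (wm.toList.length - 1)).map (fun _ => (-1 : Int)) =
      List.replicate (wm.toList.length - 1) (-1) := by
    rw [List.map_const']
    simp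
  rw [hrepl]
  congr 1
  rcases hpre with hdig | hshort
  · apply List.map_congr_left
    intro i hi
    rw [PySem.List.mem_pyRange_one] at hi
    obtain ⟨h0, hlt⟩ := hi
    obtain ⟨j, rfl⟩ : ∃ j : Nat, i = (j : Int) := ⟨i.toNat, (Int.toNat_of_nonneg h0).symm⟩
    have hjw : j + wm.toList.length ≤ dna.toList.length := by
      have := hlt
      omega
    have hdig' : ∀ c ∈ wm.toList, c.isDigit = true := by
      intro c hc
      exact List.all_eq_true.mp hdig c hc
    rw [PySem.List.slice_natCast_add]
    have hlen : ((dna.toList.drop j).take wm.toList.length).length = wm.toList.length := by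
      rw [List.length_take, List.length_drop]
      omega
    rw [process_eq _ _ hlen hdig', calc_eq_charLoop]
    have hmap : (pvOffsets wm.toList).map (fun off => ((dna.toList.drop j).take wm.toList.length).getD off ' ') =
        (pvOffsets wm.toList).map (fun off => dna.toList.getD (j + off) ' ') := by
      apply List.map_congr_left
      intro off hoff
      have hlt2 : off < wm.toList.length := pvOffsets_lt _ off hoff
      have hin : j + off < dna.toList.length := by omega
      rw [List.getD_eq_getElem?_getD, List.getD_eq_getElem?_getD]
      rw [List.getElem?_take, List.getElem?_drop, if_pos hlt2]
    rw [hmap]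
    have hb : ∀ off ∈ pvOffsets wm.toList, j + off < dna.toList.length := by
      intro off hoff
      have := pvOffsets_lt _ off hoff
      omega
    rw [show (fun c => pvVmapB.getD c (-1)) = pvCv from rfl]
    exact (winCode_eq dna.toList j (pvOffsets wm.toList) 0 hb).symm
  · rw [PySem.List.pyRange_one_eq_nil (by omega)]
    simp
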